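-- pv_equiv track=rewrite | github.com/wyhboos/mpmdn_train | src/utility.py | data_augment_for_path
-- ===== SOURCE A (Python) =====
-- def data_augment_for_path(path):
--     """
--     for path with more than 2 node, each node can be goal
--     :param path:
--     :return:
--     """
--     l = len(path)
--     if l <= 2:
--         return path
--     aug_path = []
--     for i in range(1, l):
--         path_i = [path[index] for index in range(0, i+1)]
--         aug_path.append(path_i)
--     return aug_path
-- ===== SOURCE B (Python) =====
-- def data_augment_for_path(path):
--     # Grow a running prefix and snapshot it after each extension (single forward pass).
--     if len(path) <= 2:
--         return path
--     aug_path = []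
--     cur = [path[0]]
--     for x in path[1:]:
--         cur = cur + [x]
--         aug_path.append(cur)
--     return aug_path
-- ===== Notes on version B (the rewrite author's own statement) =====
-- stated objective: alternative
-- what changed: B builds each prefix by extending a running prefix once per node in a single forward pass instead of re-scanning indices 0..i with an inner comprehension for every i.
-- outside the precondition, e.g. on data_augment_for_path([1, 2]): A returns [1, 2], B returns [1, 2]
import Mathlib
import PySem

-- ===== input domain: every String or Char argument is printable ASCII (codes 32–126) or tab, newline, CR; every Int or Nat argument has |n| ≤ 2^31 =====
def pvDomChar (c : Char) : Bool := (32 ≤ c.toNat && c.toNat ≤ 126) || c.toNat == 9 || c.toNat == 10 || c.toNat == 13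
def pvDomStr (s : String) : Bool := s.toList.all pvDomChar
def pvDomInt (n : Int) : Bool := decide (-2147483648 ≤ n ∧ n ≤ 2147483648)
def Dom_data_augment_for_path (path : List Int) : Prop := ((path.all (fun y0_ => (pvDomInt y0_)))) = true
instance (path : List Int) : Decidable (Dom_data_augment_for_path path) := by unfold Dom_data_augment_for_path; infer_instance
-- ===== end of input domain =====

-- B builds each prefix by extending a running prefix in one forward pass instead of an inner
-- index re-scan per prefix (objective: alternative decomposition). Pre_ excludes len(path) ≤ 2,
-- where Python A (and B) return the flat path itself, which is not a list of lists.


-- ===== PORT A =====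
def data_augment_for_path (path : List Int) : List (List Int) :=
  if path.length ≤ 2 then
    []  -- Python returns the flat `path` here: not a value of the declared type; excluded by Pre_
  else
    (PySem.List.pyRange 1 (path.length : Int) 1).foldl
      (fun aug_path i =>
        aug_path ++ [(PySem.List.pyRange 0 (i + 1) 1).map
          (fun index => PySem.List.pyGetD path index 0)])  -- index always in range here
      []

-- ===== PORT B =====
def data_augment_for_path_alt (path : List Int) : List (List Int) :=
  if path.length ≤ 2 then
    []  -- same untypeable Python branch, excluded by Pre_
  else
    match path with
    | [] => []
    | h :: t =>
      (t.foldl (fun (st : List (List Int) × List Int) x =>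
          (st.1 ++ [st.2 ++ [x]], st.2 ++ [x])) ([], [h])).1

-- ===== PRECONDITION & SPEC =====
-- Pre_ excludes paths of length ≤ 2, on which the Python returns the flat input list,
-- which is not a value of the declared return type list[list[int]].
def Pre_data_augment_for_path (path : List Int) : Prop := 3 ≤ path.length
instance (path : List Int) : Decidable (Pre_data_augment_for_path path) := by
  unfold Pre_data_augment_for_path; infer_instance

def pvWitness_data_augment_for_path : List Int := [1, 2, 3]

def Spec_data_augment_for_path (path : List Int) (out : List (List Int)) : Prop := out = data_augment_for_path_alt path
instance (path : List Int) (out : List (List Int)) : Decidable (Spec_data_augment_for_path path out) := by unfold Spec_data_augment_for_path; infer_instance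

-- ===== CLAIM (what is proved, stated in full; the proofs are below) =====
def Claim_equal_data_augment_for_path : Prop := ∀ (path : List Int), Dom_data_augment_for_path path → Pre_data_augment_for_path path → Spec_data_augment_for_path path (data_augment_for_path path)

-- ===== LEMMAS AND PROOFS =====

-- A's inner comprehension over range(0, n) is the n-element prefix of xs.
lemma map_pyGetD_range_take (xs : List Int) (n : Nat) (hn : n ≤ xs.length) :
    (PySem.List.pyRange 0 (n : Int) 1).map (fun index => PySem.List.pyGetD xs index 0)
      = xs.take n := by
  induction n with
  | zero => simp [PySem.List.pyRange_one_eq_nil]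
  | succ m ih =>
    rw [show ((m + 1 : Nat) : Int) = (m : Int) + 1 by push_cast; ring,
        PySem.List.pyRange_one_succ_right (by positivity)]
    rw [List.map_append, ih (by omega)]
    rw [List.take_add_one]
    simp [List.getD_eq_getElem?_getD, List.getElem?_eq_getElem (show m < xs.length by omega)]

-- A's outer foldl appends singletons: it is init ++ a map.
lemma foldl_append_singleton {α β : Type} (xs : List α) (f : α → β) (init : List β) :
    xs.foldl (fun acc x => acc ++ [f x]) init = init ++ xs.map f := by
  induction xs generalizing init with
  | nil => simp
  | cons h t ih => simp [List.foldl_cons, ih, List.append_assoc]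

-- B's fold invariant: state is (emitted prefixes, current prefix).
lemma alt_foldl_inv (t : List Int) (acc : List (List Int)) (cur : List Int) :
    (t.foldl (fun (st : List (List Int) × List Int) x =>
        (st.1 ++ [st.2 ++ [x]], st.2 ++ [x])) (acc, cur)).1
      = acc ++ (List.range t.length).map (fun k => cur ++ t.take (k + 1)) := by
  induction t generalizing acc cur with
  | nil => simp
  | cons h t ih =>
    rw [List.foldl_cons, ih]
    simp only [List.length_cons, List.range_succ_eq_map, List.map_cons, List.map_map]
    simp [List.append_assoc, Function.comp]

theorem data_augment_for_path_spec_aux (path : List Int)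
    (hpre : 3 ≤ path.length) :
    data_augment_for_path path = data_augment_for_path_alt path := by
  obtain ⟨h, t, rfl⟩ : ∃ h t, path = h :: t := by
    cases path with
    | nil => simp at hpre
    | cons h t => exact ⟨h, t, rfl⟩
  unfold data_augment_for_path data_augment_for_path_alt
  rw [if_neg (by omega), if_neg (by omega)]
  show _ = (t.foldl (fun (st : List (List Int) × List Int) x =>
      (st.1 ++ [st.2 ++ [x]], st.2 ++ [x])) ([], [h])).1
  rw [foldl_append_singleton, alt_foldl_inv, List.nil_append]
  rw [PySem.List.pyRange_one]
  rw [List.map_map]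
  have hlen : ((((h :: t).length : Int)) - 1).toNat = t.length := by simp
  rw [hlen, List.nil_append]
  apply List.map_congr_left
  intro k hk
  simp only [List.mem_range] at hk
  simp only [Function.comp]
  have : (1 : Int) + (k : Int) + 1 = ((k + 2 : Nat) : Int) := by push_cast; ring
  rw [this, map_pyGetD_range_take _ _ (by simp; omega)]
  show (h :: t).take (k + 2) = [h] ++ t.take (k + 1)
  simp [List.take_succ_cons]

-- ===== VERDICT (by name: the statement is the Claim_ definition above) =====
theorem data_augment_for_path_spec : Claim_equal_data_augment_for_path := by
  intro path _ hpre
  exact data_augment_for_path_spec_aux path hpre
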